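-- pv_equiv track=rewrite | github.com/awktavian/art | orb/packages/kagami/core/schemas/schemas/intent_lang.py | _kv_aware_split
-- ===== SOURCE A (Python) =====
-- def _kv_aware_split(token: str) -> list[str]:
--     """Split semicolons only when they start a new key=value pair.
--
--     Example: 'tools=a;b;c;scope=/apps' -> ['tools=a;b;c', 'scope=/apps']
--     """
--     if ";" not in token:
--         return [token]
--     parts = token.split(";")
--     if not parts:
--         return [token]
--
--     acc: list[str] = []
--     current = parts[0]
--     for part in parts[1:]:
--         if "=" in part:
--             # New key=value starts here
--             acc.append(current)
--             current = part
--         else: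
--             # Semicolon is part of value
--             current += ";" + part
--     acc.append(current)
--     return [p for p in acc if p]
-- ===== SOURCE B (Python) =====
-- def _kv_aware_split(token: str) -> list[str]:
--     """Split semicolons only when they start a new key=value pair.
--
--     Two-pass form: compute the boundary start-indices of the groups,
--     then slice-and-join the parts between consecutive boundaries.
--     """
--     if ";" not in token:
--         return [token]
--     parts = token.split(";")
--     starts = [0] + [i for i in range(1, len(parts)) if "=" in parts[i]]
--     ends = starts[1:] + [len(parts)]
--     groups = [";".join(parts[s:e]) for s, e in zip(starts, ends)]
--     return [g for g in groups if g]
-- ===== Notes on version B (the rewrite author's own statement) =====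
-- stated objective: alternative
-- what changed: Replaces A's single accumulating pass (growing a 'current' string and flushing it at each part that contains an equals sign) by a two-pass decomposition: first compute the boundary start-indices of the groups, then build each group by slicing the parts list between consecutive boundaries and joining with the semicolon separator.
import Mathlib
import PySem

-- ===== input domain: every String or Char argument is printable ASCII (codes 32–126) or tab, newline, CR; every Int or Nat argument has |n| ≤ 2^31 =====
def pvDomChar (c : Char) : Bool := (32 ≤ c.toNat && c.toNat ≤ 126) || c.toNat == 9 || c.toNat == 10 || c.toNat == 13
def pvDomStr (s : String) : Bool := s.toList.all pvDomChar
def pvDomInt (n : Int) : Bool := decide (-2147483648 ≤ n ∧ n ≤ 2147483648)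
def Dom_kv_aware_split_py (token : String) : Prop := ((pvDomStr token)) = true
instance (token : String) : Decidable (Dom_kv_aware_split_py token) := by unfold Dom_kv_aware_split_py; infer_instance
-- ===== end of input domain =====

-- B replaces A's single accumulating pass by boundary-index computation followed by slice-and-join (objective: alternative decomposition, same cost).

-- ===== PORT A =====
-- the body of A's for-loop: state = (acc, current)
def kvStepA (st : List (List Char) × List Char) (part : List Char) : List (List Char) × List Char :=
  if PySem.Chars.isIn ['='] part then (st.1 ++ [st.2], part) else (st.1, st.2 ++ [';'] ++ part)

def kv_aware_split_py (token : String) : List String :=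
  if PySem.Str.isIn ";" token = false then [token]
  else
    let parts := PySem.Chars.splitOn token.toList [';']
    if parts = [] then [token]
    else
      -- parts[1:] is List.drop 1; parts[0] is headI (parts ≠ [] on this branch)
      let st := (parts.drop 1).foldl kvStepA ([], parts.headI)
      ((st.1 ++ [st.2]).filter (fun p => p ≠ [])).map String.ofList

-- ===== PORT B =====
def kv_aware_split_py_alt (token : String) : List String :=
  if PySem.Str.isIn ";" token = false then [token]
  else
    let parts := PySem.Chars.splitOn token.toList [';']
    let starts : List Int :=
      0 :: (PySem.List.pyRange 1 (parts.length : Int) 1).filter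
        (fun i => PySem.Chars.isIn ['='] (PySem.List.pyGetD parts i []))
    let ends : List Int := starts.drop 1 ++ [(parts.length : Int)]
    let groups := (starts.zip ends).map
      (fun se => PySem.Chars.join [';'] (PySem.List.slice parts (some se.1) (some se.2)))
    (groups.filter (fun g => g ≠ [])).map String.ofList

-- ===== PRECONDITION & SPEC =====
def Spec_kv_aware_split_py (token : String) (out : List String) : Prop := out = kv_aware_split_py_alt token
instance (token : String) (out : List String) : Decidable (Spec_kv_aware_split_py token out) := by unfold Spec_kv_aware_split_py; infer_instance

-- ===== CLAIM (what is proved, stated in full; the proofs are below) =====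
def Claim_equal_kv_aware_split_py : Prop := ∀ (token : String), Dom_kv_aware_split_py token → Spec_kv_aware_split_py token (kv_aware_split_py token)

-- ===== LEMMAS AND PROOFS =====

-- splitOn never returns []
lemma kv_go_ne_nil (sep : List Char) : ∀ (fuel : Nat) (l cur : List Char) (acc : List (List Char)),
    PySem.Chars.splitOn.go sep fuel l cur acc ≠ [] := by
  intro fuel
  induction fuel with
  | zero => intro l cur acc; simp [PySem.Chars.splitOn.go]
  | succ n ih =>
    intro l cur acc
    cases l with
    | nil => simp [PySem.Chars.splitOn.go]
    | cons c rest =>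
      rw [PySem.Chars.splitOn.go]
      split
      · exact ih _ _ _
      · exact ih _ _ _

lemma kv_splitOn_ne_nil (s sep : List Char) : PySem.Chars.splitOn s sep ≠ [] :=
  kv_go_ne_nil sep _ s [] []

-- the grouping both programs compute, as a recursion over the parts
def kvAbsorb (cur : List Char) : List (List Char) → List (List Char)
  | [] => [cur]
  | q :: qs => if PySem.Chars.isIn ['='] q then cur :: kvAbsorb q qs
               else kvAbsorb (cur ++ [';'] ++ q) qs

-- A-side: the foldl with state (acc, current) computes acc ++ kvAbsorb current rest
lemma kvFoldA (ps : List (List Char)) : ∀ (acc : List (List Char)) (cur : List Char),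
    (ps.foldl kvStepA (acc, cur)).1 ++ [(ps.foldl kvStepA (acc, cur)).2] = acc ++ kvAbsorb cur ps := by
  induction ps with
  | nil => intro acc cur; simp [kvAbsorb]
  | cons q qs ih =>
    intro acc cur
    simp only [List.foldl_cons, kvStepA, kvAbsorb]
    by_cases h : PySem.Chars.isIn ['='] q
    · simp [h, ih]
    · simp [h, ih]

-- B-side, in Nat terms: the 1-based boundary indices into the tail of the parts
def kvNatT (ps : List (List Char)) : List Nat :=
  ((List.range ps.length).filter (fun k => PySem.Chars.isIn ['='] (ps.getD k []))).map (· + 1)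

-- B-side, in Nat terms: slice-and-join between consecutive boundaries
def kvGroups (parts : List (List Char)) (S : List Nat) : List (List Char) :=
  (S.zip (S.drop 1 ++ [parts.length])).map
    (fun se => PySem.Chars.join [';'] ((parts.drop se.1).take (se.2 - se.1)))

lemma kvNatT_cons (q : List Char) (qs : List (List Char)) :
    kvNatT (q :: qs)
      = (if PySem.Chars.isIn ['='] q then [1] else []) ++ (kvNatT qs).map (· + 1) := by
  simp only [kvNatT, List.length_cons, List.range_succ_eq_map, List.filter_cons,
    List.getD_cons_zero, List.filter_map, List.map_map]
  by_cases h : PySem.Chars.isIn ['='] q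
  · simp [h, Function.comp_def]
  · simp [h, Function.comp_def]

lemma kvNatT_pos (ps : List (List Char)) : ∀ t ∈ kvNatT ps, 1 ≤ t := by
  intro t ht
  simp only [kvNatT, List.mem_map, List.mem_filter] at ht
  obtain ⟨k, _, rfl⟩ := ht
  omega

-- dropping everything by one index slides the grouping off a cons cell
lemma kvShift (p : List Char) (rest : List (List Char)) (S E : List Nat) :
    ((S.map (· + 1)).zip (E.map (· + 1))).map
      (fun se => PySem.Chars.join [';'] (((p :: rest).drop se.1).take (se.2 - se.1)))
    = (S.zip E).map (fun se => PySem.Chars.join [';'] ((rest.drop se.1).take (se.2 - se.1))) := by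
  rw [List.zip_map, List.map_map]
  apply List.map_congr_left
  intro se _
  simp [Prod.map, Nat.succ_sub_succ]

lemma kvJoinShift (p q : List Char) (l : List (List Char)) :
    PySem.Chars.join [';'] (p :: q :: l) = PySem.Chars.join [';'] ((p ++ [';'] ++ q) :: l) := by
  cases l with
  | nil => simp [PySem.Chars.join_cons_cons, PySem.Chars.join_singleton]
  | cons r rs =>
    rw [PySem.Chars.join_cons_cons, PySem.Chars.join_cons_cons, PySem.Chars.join_cons_cons]
    simp [List.append_assoc]

-- merging the first two parts when no boundary separates them
lemma kvReplaceHead (p q : List Char) (qs : List (List Char)) (T : List Nat)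
    (hT : ∀ t ∈ T, 1 ≤ t) :
    kvGroups (p :: q :: qs) (0 :: T.map (· + 1)) = kvGroups ((p ++ [';'] ++ q) :: qs) (0 :: T) := by
  cases T with
  | nil =>
    simp only [kvGroups, List.map_nil, List.drop_succ_cons, List.drop_nil, List.nil_append,
      List.zip_cons_cons, List.zip_nil_right, List.map_cons, List.drop_zero, Nat.sub_zero,
      List.length_cons]
    rw [List.take_of_length_le (by simp), List.take_of_length_le (by simp)]
    simp [kvJoinShift]
  | cons t ts =>
    obtain ⟨m, rfl⟩ : ∃ m, t = m + 1 := ⟨t - 1, by have := hT t (by simp); omega⟩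
    simp only [kvGroups, List.map_cons, List.drop_succ_cons, List.drop_zero, List.length_cons,
      List.cons_append, List.zip_cons_cons, List.map_cons]
    congr 1
    · -- first group
      simp only [Nat.sub_zero, List.take_succ_cons]
      rw [← kvJoinShift]
    · -- remaining groups: shift indices by one off the head cons
      rw [show ((m + 1 + 1) :: ts.map (· + 1)).zip (ts.map (· + 1) ++ [qs.length + 1 + 1])
            = (((m + 1) :: ts).map (· + 1)).zip ((ts ++ [qs.length + 1]).map (· + 1)) by simp,
         kvShift]
      apply List.map_congr_left
      intro se hse
      have hs : se.1 ∈ (m + 1) :: ts := (List.of_mem_zip hse).1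
      have h1 : 1 ≤ se.1 := by
        rcases List.mem_cons.1 hs with h | h
        · omega
        · exact hT _ (by simp [h])
      obtain ⟨u, hu⟩ : ∃ u, se.1 = u + 1 := ⟨se.1 - 1, by omega⟩
      simp [hu]

-- main B-side characterisation
lemma kvMain (ps : List (List Char)) : ∀ (p : List Char),
    kvGroups (p :: ps) (0 :: kvNatT ps) = kvAbsorb p ps := by
  induction ps with
  | nil =>
    intro p
    simp [kvGroups, kvNatT, kvAbsorb, PySem.Chars.join_singleton]
  | cons q qs ih =>
    intro p
    rw [kvNatT_cons]
    by_cases h : PySem.Chars.isIn ['='] q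
    · -- boundary: first group is just p
      simp only [h, if_true, List.singleton_append]
      simp only [kvGroups, List.map_cons, List.drop_succ_cons, List.drop_zero, List.length_cons,
        List.cons_append, List.zip_cons_cons]
      rw [show kvAbsorb p (q :: qs) = p :: kvAbsorb q qs by simp [kvAbsorb, h]]
      congr 1
      · simp [PySem.Chars.join_singleton]
      · rw [show ((1 : Nat) :: (kvNatT qs).map (· + 1)).zip ((kvNatT qs).map (· + 1) ++ [qs.length + 1 + 1])
              = (((0 : Nat) :: kvNatT qs).map (· + 1)).zip ((kvNatT qs ++ [qs.length + 1]).map (· + 1)) by simp,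
           kvShift]
        have := ih q
        simp only [kvGroups, List.drop_succ_cons, List.drop_zero, List.length_cons] at this
        exact this
    · -- no boundary: the head absorbs the next part
      simp only [h, Bool.false_eq_true, if_false, List.nil_append]
      rw [kvReplaceHead p q qs (kvNatT qs) (kvNatT_pos qs), ih]
      simp [kvAbsorb, h]

-- B's Int-level boundary list is the Nat-level one, cast
lemma kvStartsEq (p : List Char) (ps : List (List Char)) :
    ((0 : Int) :: (PySem.List.pyRange 1 (((p :: ps).length : Nat) : Int) 1).filter
        (fun i => PySem.Chars.isIn ['='] (PySem.List.pyGetD (p :: ps) i [])))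
      = ((0 : Nat) :: kvNatT ps).map (fun k : Nat => (k : Int)) := by
  rw [List.map_cons, Nat.cast_zero]
  congr 1
  rw [PySem.List.pyRange_one,
      show ((((p :: ps).length : Nat) : Int) - 1).toNat = ps.length by simp,
      List.filter_map]
  have hpred : ∀ k ∈ List.range ps.length,
      ((fun i => PySem.Chars.isIn ['='] (PySem.List.pyGetD (p :: ps) i []))
        ∘ (fun k : Nat => 1 + (k : Int))) k
        = PySem.Chars.isIn ['='] (ps.getD k []) := by
    intro k _
    simp only [Function.comp]
    rw [show (1 : Int) + (k : Int) = ((k + 1 : Nat) : Int) by push_cast; ring,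
        PySem.List.pyGetD_natCast]
    simp [List.getD]
  rw [List.filter_congr hpred, kvNatT, List.map_map]
  apply List.map_congr_left
  intro k _
  simp
  ring

theorem kv_equal (token : String) : kv_aware_split_py token = kv_aware_split_py_alt token := by
  unfold kv_aware_split_py kv_aware_split_py_alt
  by_cases h : PySem.Str.isIn ";" token = false
  · rw [if_pos h, if_pos h]
  · rw [if_neg h, if_neg h]
    obtain ⟨p, ps, hp⟩ : ∃ p ps, PySem.Chars.splitOn token.toList [';'] = p :: ps := by
      cases hsp : PySem.Chars.splitOn token.toList [';'] with
      | nil => exact absurd hsp (kv_splitOn_ne_nil _ _)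
      | cons p ps => exact ⟨p, ps, rfl⟩
    rw [hp]
    simp only [if_neg (by simp : ¬(p :: ps = ([] : List (List Char))))]
    congr 1
    congr 1
    -- A side: foldl = kvAbsorb
    rw [List.drop_one, List.tail_cons, List.headI_cons, kvFoldA ps [] p, List.nil_append]
    -- B side: starts/ends/zip/slice = kvGroups, then kvMain
    rw [kvStartsEq p ps]
    rw [show (((0 : Nat) :: kvNatT ps).map (fun k : Nat => (k : Int))).drop 1 ++ [((p :: ps).length : Int)]
          = ((((0 : Nat) :: kvNatT ps).drop 1) ++ [(p :: ps).length]).map (fun k : Nat => (k : Int)) by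
        simp]
    rw [List.zip_map, List.map_map]
    rw [show ((fun se => PySem.Chars.join [';'] (PySem.List.slice (p :: ps) (some se.1) (some se.2))) ∘
          Prod.map (fun k : Nat => (k : Int)) (fun k : Nat => (k : Int)))
        = (fun se : Nat × Nat => PySem.Chars.join [';'] (((p :: ps).drop se.1).take (se.2 - se.1))) by
      funext se
      simp [Prod.map, PySem.List.slice_natCast]]
    exact (kvMain ps p).symm

-- ===== VERDICT (by name: the statement is the Claim_ definition above) =====
theorem kv_aware_split_py_spec : Claim_equal_kv_aware_split_py := by
  intro token _
  unfold Spec_kv_aware_split_py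
  exact kv_equal token
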